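-- pv_equiv track=rewrite | github.com/nthPerson/FAMAIL | processor.py | get_neighborhood_cells
-- ===== SOURCE A (Python) =====
-- from typing import Dict, Tuple, Optional, List, Set
--
-- def get_neighborhood_cells(
--     x: int,
--     y: int,
--     k: int,
--     grid_dims: Tuple[int, int]
-- ) -> List[Tuple[int, int]]:
--     """
--     Get all cells in the (2k+1) × (2k+1) neighborhood around (x, y).
--
--     Clips to valid grid boundaries.
--
--     Args:
--         x: Center cell x coordinate (1-indexed)
--         y: Center cell y coordinate (1-indexed)
--         k: Neighborhood size parameter (radius)
--         grid_dims: (x_max, y_max) grid dimensions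
--
--     Returns:
--         List of (x, y) tuples for all cells in the neighborhood
--     """
--     x_max, y_max = grid_dims
--     cells = []
--
--     for dx in range(-k, k + 1):
--         for dy in range(-k, k + 1):
--             nx, ny = x + dx, y + dy
--             # Check bounds (1-indexed)
--             if 1 <= nx <= x_max and 1 <= ny <= y_max:
--                 cells.append((nx, ny))
--
--     return cells
-- ===== SOURCE B (Python) =====
-- def get_neighborhood_cells(x, y, k, grid_dims):
--     x_max, y_max = grid_dims
--     lo_x, lo_y = max(1, x - k), max(1, y - k)
--     w = min(x_max, x + k) - lo_x + 1
--     h = min(y_max, y + k) - lo_y + 1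
--     if w <= 0 or h <= 0:
--         return []
--     # single flat loop: decode the running index into (row, column) with divmod
--     return [(lo_x + i // h, lo_y + i % h) for i in range(w * h)]
-- ===== Notes on version B (the rewrite author's own statement) =====
-- stated objective: alternative
-- what changed: Replaces the nested (2k+1)x(2k+1) scan with a per-cell bounds test by a single flat loop over the clipped rectangle's cell count, decoding each running index into coordinates with divmod.
import Mathlib
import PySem

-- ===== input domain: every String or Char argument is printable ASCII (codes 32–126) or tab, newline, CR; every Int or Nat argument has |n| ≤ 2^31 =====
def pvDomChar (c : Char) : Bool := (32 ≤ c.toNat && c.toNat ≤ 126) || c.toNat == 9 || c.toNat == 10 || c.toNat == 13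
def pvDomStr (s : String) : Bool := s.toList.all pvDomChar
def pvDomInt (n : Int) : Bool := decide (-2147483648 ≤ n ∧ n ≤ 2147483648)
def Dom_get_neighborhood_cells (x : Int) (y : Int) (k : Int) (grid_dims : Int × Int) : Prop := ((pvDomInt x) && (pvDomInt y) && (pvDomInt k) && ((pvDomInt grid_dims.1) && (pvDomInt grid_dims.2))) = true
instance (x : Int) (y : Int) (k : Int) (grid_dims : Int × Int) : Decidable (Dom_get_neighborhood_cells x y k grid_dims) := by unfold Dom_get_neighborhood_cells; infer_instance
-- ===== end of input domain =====

-- B replaces the nested scan with a per-cell bounds test by one flat loop over the clipped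
-- rectangle's cell count, decoding each index into coordinates with divmod (alternative).


-- ===== PORT A =====
def get_neighborhood_cells (x : Int) (y : Int) (k : Int) (grid_dims : Int × Int) : List (Int × Int) :=
  let x_max := grid_dims.1
  let y_max := grid_dims.2
  (PySem.List.pyRange (-k) (k + 1) 1).foldl (fun cells dx =>
    (PySem.List.pyRange (-k) (k + 1) 1).foldl (fun cells dy =>
      let nx := x + dx
      let ny := y + dy
      if 1 ≤ nx ∧ nx ≤ x_max ∧ 1 ≤ ny ∧ ny ≤ y_max then cells ++ [(nx, ny)] else cells)
      cells) []

-- ===== PORT B =====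
def get_neighborhood_cells_alt (x : Int) (y : Int) (k : Int) (grid_dims : Int × Int) : List (Int × Int) :=
  let lo_x := max 1 (x - k)
  let lo_y := max 1 (y - k)
  let w := min grid_dims.1 (x + k) - lo_x + 1
  let h := min grid_dims.2 (y + k) - lo_y + 1
  if w ≤ 0 ∨ h ≤ 0 then []
  else (PySem.List.pyRange 0 (w * h) 1).map
    (fun i => (lo_x + PySem.Int.floordiv i h, lo_y + PySem.Int.mod i h))

-- ===== PRECONDITION & SPEC =====
def Spec_get_neighborhood_cells (x : Int) (y : Int) (k : Int) (grid_dims : Int × Int) (out : List (Int × Int)) : Prop := out = get_neighborhood_cells_alt x y k grid_dims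
instance (x : Int) (y : Int) (k : Int) (grid_dims : Int × Int) (out : List (Int × Int)) : Decidable (Spec_get_neighborhood_cells x y k grid_dims out) := by unfold Spec_get_neighborhood_cells; infer_instance

-- ===== CLAIM (what is proved, stated in full; the proofs are below) =====
def Claim_equal_get_neighborhood_cells : Prop := ∀ (x : Int) (y : Int) (k : Int) (grid_dims : Int × Int), Dom_get_neighborhood_cells x y k grid_dims → Spec_get_neighborhood_cells x y k grid_dims (get_neighborhood_cells x y k grid_dims)

-- ===== LEMMAS AND PROOFS =====

-- A flatMap whose body is empty off a predicate is a flatMap over the filtered list.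
lemma flatMap_ite_nil {α β : Type} (l : List α) (p : α → Prop) [DecidablePred p]
    (h : α → List β) :
    l.flatMap (fun t => if p t then h t else []) = (l.filter (fun t => decide (p t))).flatMap h := by
  induction l with
  | nil => rfl
  | cons a l ih =>
    by_cases hp : p a <;> simp [hp, ih]

-- Shifting and clipping: filtering a range by `lo ≤ c + t ≤ hi` and then adding `c`
-- is exactly the clipped range.
lemma clip_shift (a b c lo hi : Int) :
    ((PySem.List.pyRange a b 1).filter (fun t => decide (lo ≤ c + t ∧ c + t ≤ hi))).map
        (fun t => c + t)
      = PySem.List.pyRange (max (c + a) lo) (min (c + b - 1) hi + 1) 1 := by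
  refine List.Perm.eq_of_pairwise (le := (· < ·)) (fun a b _ _ h1 h2 => by omega) ?_ ?_ ?_
  · exact ((PySem.List.pairwise_lt_pyRange_one _ _).filter _).map _ (fun _ _ h => by omega)
  · exact PySem.List.pairwise_lt_pyRange_one _ _
  · rw [List.perm_ext_iff_of_nodup]
    · intro z
      simp only [List.mem_map, List.mem_filter, PySem.List.mem_pyRange_one, decide_eq_true_eq]
      constructor
      · rintro ⟨t, ⟨⟨ht1, ht2⟩, hlo, hhi⟩, rfl⟩; omega
      · intro hz; refine ⟨z - c, ⟨⟨?_, ?_⟩, ?_, ?_⟩, ?_⟩ <;> omega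
    · exact ((PySem.List.nodup_pyRange_one _ _).filter _).map (fun _ _ h => by omega)
    · exact PySem.List.nodup_pyRange_one _ _

-- A's double loop equals a flatMap over the clipped coordinate ranges.
lemma A_nested (x y k : Int) (gd : Int × Int) :
    get_neighborhood_cells x y k gd =
      (PySem.List.pyRange (max 1 (x - k)) (min gd.1 (x + k) + 1) 1).flatMap
        (fun nx => (PySem.List.pyRange (max 1 (y - k)) (min gd.2 (y + k) + 1) 1).map
          (fun ny => (nx, ny))) := by
  unfold get_neighborhood_cells
  simp only [PySem.List.foldl_append_ite, PySem.List.foldl_append_eq_flatMap, List.nil_append]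
  have step : ∀ dx : Int,
      ((PySem.List.pyRange (-k) (k + 1) 1).filter
          (fun dy => decide (1 ≤ x + dx ∧ x + dx ≤ gd.1 ∧ 1 ≤ y + dy ∧ y + dy ≤ gd.2))).map
        (fun dy => (x + dx, y + dy))
      = if 1 ≤ x + dx ∧ x + dx ≤ gd.1 then
          (PySem.List.pyRange (max 1 (y - k)) (min gd.2 (y + k) + 1) 1).map
            (fun ny => (x + dx, ny))
        else [] := by
    intro dx
    by_cases hdx : 1 ≤ x + dx ∧ x + dx ≤ gd.1
    · rw [if_pos hdx]
      rw [List.filter_congr (q := fun dy => decide (1 ≤ y + dy ∧ y + dy ≤ gd.2))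
          (by intro dy _; simp [hdx.1, hdx.2])]
      have : (fun dy => ((x + dx : Int), y + dy)) =
          (fun ny => ((x + dx : Int), ny)) ∘ (fun dy => y + dy) := rfl
      rw [this, ← List.map_map, clip_shift (-k) (k + 1) y 1 gd.2]
      congr 2
      · omega
      · omega
    · rw [if_neg hdx]
      rw [List.filter_eq_nil_iff.mpr (by intro dy _; simp; omega)]
      rfl
  calc (PySem.List.pyRange (-k) (k + 1) 1).flatMap
        (fun dx => ((PySem.List.pyRange (-k) (k + 1) 1).filter
            (fun dy => decide (1 ≤ x + dx ∧ x + dx ≤ gd.1 ∧ 1 ≤ y + dy ∧ y + dy ≤ gd.2))).map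
          (fun dy => (x + dx, y + dy)))
      = (PySem.List.pyRange (-k) (k + 1) 1).flatMap
          (fun dx => if 1 ≤ x + dx ∧ x + dx ≤ gd.1 then
              (PySem.List.pyRange (max 1 (y - k)) (min gd.2 (y + k) + 1) 1).map
                (fun ny => (x + dx, ny))
            else []) := by
        exact List.flatMap_congr (fun dx _ => step dx)
    _ = (((PySem.List.pyRange (-k) (k + 1) 1).filter
            (fun dx => decide (1 ≤ x + dx ∧ x + dx ≤ gd.1))).map (fun dx => x + dx)).flatMap
          (fun nx => (PySem.List.pyRange (max 1 (y - k)) (min gd.2 (y + k) + 1) 1).map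
            (fun ny => (nx, ny))) := by
        rw [flatMap_ite_nil, List.flatMap_map]
    _ = (PySem.List.pyRange (max 1 (x - k)) (min gd.1 (x + k) + 1) 1).flatMap
          (fun nx => (PySem.List.pyRange (max 1 (y - k)) (min gd.2 (y + k) + 1) 1).map
            (fun ny => (nx, ny))) := by
        rw [clip_shift (-k) (k + 1) x 1 gd.1]
        congr 2
        · omega
        · omega

-- A range starting anywhere is a shifted range starting at 0.
lemma shift_range (c h : Int) :
    PySem.List.pyRange c (c + h) 1 = (PySem.List.pyRange 0 h 1).map (fun j => c + j) := by
  rw [PySem.List.pyRange_one, PySem.List.pyRange_one, List.map_map]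
  have : c + h - c = h - 0 := by omega
  rw [this]
  exact List.map_congr_left (fun t _ => by simp)

-- Decoding a flat index with divmod reproduces the nested row-major traversal.
lemma divmod_decode (a b h : Int) (hh : 0 < h) : ∀ W : Nat,
    (PySem.List.pyRange 0 ((W : Int) * h) 1).map
        (fun i => (a + PySem.Int.floordiv i h, b + PySem.Int.mod i h))
      = (PySem.List.pyRange a (a + (W : Int)) 1).flatMap
          (fun nx => (PySem.List.pyRange b (b + h) 1).map (fun ny => (nx, ny))) := by
  intro W
  induction W with
  | zero => simp [PySem.List.pyRange_one_eq_nil]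
  | succ W ih =>
    have hW0 : (0:Int) ≤ (W : Int) * h := mul_nonneg (by positivity) (le_of_lt hh)
    have hWs : ((W : Int)) * h ≤ ((W:Int)+1) * h := by nlinarith
    have hsplit : PySem.List.pyRange 0 (((W:Int)+1) * h) 1
        = PySem.List.pyRange 0 ((W:Int) * h) 1
          ++ PySem.List.pyRange ((W:Int) * h) (((W:Int)+1) * h) 1 :=
      PySem.List.pyRange_one_append _ _ _ hW0 hWs
    have hsplit2 : PySem.List.pyRange a (a + ((W:Int)+1)) 1
        = PySem.List.pyRange a (a + (W:Int)) 1 ++ [a + (W:Int)] := by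
      have : a + ((W:Int)+1) = (a + (W:Int)) + 1 := by omega
      rw [this]
      exact PySem.List.pyRange_one_succ_right (by omega)
    have hblock : (PySem.List.pyRange ((W:Int) * h) (((W:Int)+1) * h) 1).map
          (fun i => (a + PySem.Int.floordiv i h, b + PySem.Int.mod i h))
        = (PySem.List.pyRange b (b + h) 1).map (fun ny => (a + (W:Int), ny)) := by
      have hend : ((W:Int)+1) * h = (W:Int) * h + h := by ring
      rw [hend, shift_range ((W:Int) * h) h, List.map_map, shift_range b h, List.map_map]
      refine List.map_congr_left (fun j hj => ?_)
      rw [PySem.List.mem_pyRange_one] at hj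
      have hdiv : PySem.Int.floordiv ((W:Int) * h + j) h = (W:Int) := by
        rw [PySem.Int.floordiv_eq_iff_of_pos hh]
        constructor <;> nlinarith [hj.1, hj.2]
      have hmod : PySem.Int.mod ((W:Int) * h + j) h = j := by
        have := PySem.Int.floordiv_mul_add_mod ((W:Int) * h + j) h
        rw [hdiv] at this
        omega
      simp [hdiv, hmod]
    push_cast
    rw [hsplit, hsplit2, List.map_append, List.flatMap_append, ih, hblock]
    simp

-- ===== VERDICT (by name: the statement is the Claim_ definition above) =====
theorem get_neighborhood_cells_spec : Claim_equal_get_neighborhood_cells := by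
  intro x y k gd _
  show get_neighborhood_cells x y k gd = get_neighborhood_cells_alt x y k gd
  rw [A_nested]
  unfold get_neighborhood_cells_alt
  simp only []
  set lo_x := max 1 (x - k) with hlx
  set lo_y := max 1 (y - k) with hly
  set w := min gd.1 (x + k) - lo_x + 1 with hw
  set h := min gd.2 (y + k) - lo_y + 1 with hh
  by_cases hdeg : w ≤ 0 ∨ h ≤ 0
  · rw [if_pos hdeg]
    rcases hdeg with hw0 | hh0
    · have hx : PySem.List.pyRange lo_x (min gd.1 (x + k) + 1) 1 = [] :=
        PySem.List.pyRange_one_eq_nil (by omega)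
      rw [hx]; rfl
    · have : PySem.List.pyRange lo_y (min gd.2 (y + k) + 1) 1 = [] :=
        PySem.List.pyRange_one_eq_nil (by omega)
      simp [this]
  · rw [if_neg hdeg]
    have hw0 : 0 < w := by omega
    have hh0 : 0 < h := by omega
    obtain ⟨W, hWw⟩ : ∃ W : Nat, w = (W : Int) := ⟨w.toNat, by omega⟩
    have e1 : min gd.1 (x + k) + 1 = lo_x + (W : Int) := by omega
    have e2 : min gd.2 (y + k) + 1 = lo_y + h := by omega
    rw [e1, e2, hWw, ← divmod_decode lo_x lo_y h (by omega) W]
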